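-- pv_equiv track=rewrite | github.com/bassonk3767/year-12-COM-assessment- | 02_c_statistics_tools_v01.py | factorial_arr
-- ===== SOURCE A (Python) =====
-- def factorial_arr(data):
--
--     # Get the number of items
--     # found within array
--     length = len(data)
--
--     # Initialize result as 0
--     result = 0
--
--     # Performing a for loop in order to
--     # compute the factorial value
--     for i in range(0, length):
--         if length > 1:
--             if result == 0:
--                 result = length*(length-1)
--             else:
--                 result = result*(length-1)
--         length -= 1
--
--     return result
-- ===== SOURCE B (Python) =====
-- def factorial_arr(data):
--     n = len(data)
--     if n <= 1:
--         return 0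
--     return _prod_range(2, n)
--
--
-- def _prod_range(lo, hi):
--     # product of the integers lo..hi inclusive, by balanced range splitting
--     if lo == hi:
--         return lo
--     mid = (lo + hi) // 2
--     return _prod_range(lo, mid) * _prod_range(mid + 1, hi)
-- ===== Notes on version B (the rewrite author's own statement) =====
-- stated objective: faster
-- what changed: Replaces A's decrementing sequential-multiply loop (with its result==0 sentinel branching) by a guard (len<=1 -> 0) plus a recursive divide-and-conquer product tree over the range 2..n, with no sequential accumulator.
import Mathlib
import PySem

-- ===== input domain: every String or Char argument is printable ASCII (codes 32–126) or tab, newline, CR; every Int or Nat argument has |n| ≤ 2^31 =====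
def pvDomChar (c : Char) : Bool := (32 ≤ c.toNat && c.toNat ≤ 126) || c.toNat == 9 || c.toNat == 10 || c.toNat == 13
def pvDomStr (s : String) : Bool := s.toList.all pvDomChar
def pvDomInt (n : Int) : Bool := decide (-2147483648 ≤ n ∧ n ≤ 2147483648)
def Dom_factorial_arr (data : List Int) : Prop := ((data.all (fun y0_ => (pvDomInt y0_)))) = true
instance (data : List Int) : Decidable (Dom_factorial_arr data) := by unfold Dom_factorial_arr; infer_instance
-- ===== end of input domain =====

-- B replaces A's decrementing sequential-multiply loop (with its result==0 sentinel branches)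
-- by a guard (len<=1 -> 0) plus a recursive divide-and-conquer product tree over 2..n; objective: alternative.

-- ===== PORT A =====
-- the for-loop: runs len(data) times; state is (length, result), updated exactly as in A
def faLoop : Nat → Int → Int → Int
  | 0, _, result => result
  | k+1, length, result =>
      faLoop k (length - 1)
        (if length > 1 then
           (if result = 0 then length * (length - 1) else result * (length - 1))
         else result)

def factorial_arr (data : List Int) : Int :=
  faLoop data.length (data.length : Int) 0

-- ===== PORT B =====
-- _prod_range(lo, hi): product of lo..hi by balanced splitting; only ever called with lo ≤ hi
-- (the `hi ≤ lo` guard returns the lo==hi base case and makes the recursion total)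
def prodRange (lo hi : Nat) : Int :=
  if hi ≤ lo then (lo : Int)
  else
    let mid := (lo + hi) / 2
    prodRange lo mid * prodRange (mid + 1) hi
termination_by hi - lo
decreasing_by all_goals omega

def factorial_arr_alt (data : List Int) : Int :=
  let n := data.length
  if n ≤ 1 then 0 else prodRange 2 n

-- ===== PRECONDITION & SPEC =====
def Spec_factorial_arr (data : List Int) (out : Int) : Prop := out = factorial_arr_alt data
instance (data : List Int) (out : Int) : Decidable (Spec_factorial_arr data out) := by unfold Spec_factorial_arr; infer_instance

-- ===== CLAIM (what is proved, stated in full; the proofs are below) =====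
def Claim_equal_factorial_arr : Prop := ∀ (data : List Int), Dom_factorial_arr data → Spec_factorial_arr data (factorial_arr data)

-- ===== LEMMAS AND PROOFS =====

-- proof-side factorial, the common value of both ports for n ≥ 2
def pvFact : Nat → Int
  | 0 => 1
  | n+1 => ((n : Int) + 1) * pvFact n

-- the product tree over lo..hi equals the interval product ∏_{k ∈ Ioc (lo-1) hi} k
theorem prodRange_eq_prod_Ioc (d lo hi : Nat) (h1 : 1 ≤ lo) (hlh : lo ≤ hi) (hd : hi - lo ≤ d) :
    prodRange lo hi = ∏ k ∈ Finset.Ioc (lo - 1) hi, (k : Int) := by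
  induction d generalizing lo hi with
  | zero =>
      have : lo = hi := by omega
      subst this
      rw [prodRange]
      have : Finset.Ioc (lo - 1) lo = {lo} := by
        apply Finset.ext; intro x; simp [Finset.mem_Ioc]; omega
      simp [this]
  | succ m ih =>
      by_cases he : hi ≤ lo
      · have : lo = hi := by omega
        subst this
        rw [prodRange]
        have : Finset.Ioc (lo - 1) lo = {lo} := by
          apply Finset.ext; intro x; simp [Finset.mem_Ioc]; omega
        simp [this]
      · rw [prodRange]
        simp only [if_neg he]
        have hmid1 : lo ≤ (lo + hi) / 2 := by omega
        have hmid2 : (lo + hi) / 2 < hi := by omega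
        rw [ih lo ((lo + hi) / 2) h1 hmid1 (by omega),
            ih ((lo + hi) / 2 + 1) hi (by omega) (by omega) (by omega)]
        have hs : (lo + hi) / 2 + 1 - 1 = (lo + hi) / 2 := by omega
        rw [hs, Finset.prod_Ioc_consecutive _ (by omega : lo - 1 ≤ (lo + hi) / 2) (le_of_lt hmid2)]

-- pvFact as an interval product
theorem pvFact_eq_prod_Ioc (n : Nat) : pvFact n = ∏ k ∈ Finset.Ioc 0 n, (k : Int) := by
  induction n with
  | zero => simp [pvFact]
  | succ m ih =>
      rw [Finset.prod_Ioc_succ_top (by omega)]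
      simp [pvFact, ih]; ring

-- the product tree over 2..n computes n! for n ≥ 2
theorem prodRange_fact (n : Nat) (hn : 2 ≤ n) : prodRange 2 n = pvFact n := by
  rw [prodRange_eq_prod_Ioc (n - 2) 2 n (by omega) hn (by omega), pvFact_eq_prod_Ioc]
  have : Finset.Ioc 0 n = insert 1 (Finset.Ioc 1 n) := by
    apply Finset.ext; intro x; simp [Finset.mem_Ioc]; omega
  rw [this, Finset.prod_insert (by simp)]
  norm_num

-- A side: once result is nonzero, the k+1 remaining iterations starting at length = k+1 multiply in k!
theorem faLoop_ne_zero (k : Nat) : ∀ r : Int, r ≠ 0 →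
    faLoop (k+1) ((k : Int) + 1) r = r * pvFact k := by
  induction k with
  | zero =>
      intro r _
      simp [faLoop, pvFact]
  | succ m ih =>
      intro r hr
      have hstep : faLoop (m+2) (((m+1 : Nat) : Int) + 1) r
          = faLoop (m+1) ((m : Int) + 1) (r * ((m : Int) + 1)) := by
        have hgt : (((m+1 : Nat) : Int) + 1) > 1 := by push_cast; omega
        have hc : (((m+1 : Nat) : Int) + 1) - 1 = (m : Int) + 1 := by push_cast; ring
        simp only [faLoop, if_pos hgt, if_neg hr, hc]
      rw [hstep, ih (r * ((m : Int) + 1)) (mul_ne_zero hr (by positivity))]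
      simp [pvFact]; ring

-- A's whole loop computes n! for n ≥ 2
theorem faLoop_fact (n : Nat) (hn : 2 ≤ n) :
    faLoop n (n : Int) 0 = pvFact n := by
  obtain ⟨k, rfl⟩ : ∃ k, n = k + 2 := ⟨n - 2, by omega⟩
  have hgt : ((k + 2 : Nat) : Int) > 1 := by push_cast; omega
  have hstep : faLoop (k+2) ((k+2 : Nat) : Int) 0
      = faLoop (k+1) ((k : Int) + 1) (((k : Int)+2) * ((k : Int)+1)) := by
    have hc : ((k + 2 : Nat) : Int) - 1 = (k : Int) + 1 := by push_cast; ring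
    simp only [faLoop, if_pos hgt, hc]
    norm_num
  have hr : (((k : Int)+2) * ((k : Int)+1)) ≠ 0 := by positivity
  rw [hstep, faLoop_ne_zero k _ hr]
  simp [pvFact]; ring

-- ===== VERDICT (by name: the statement is the Claim_ definition above) =====
theorem factorial_arr_spec : Claim_equal_factorial_arr := by
  intro data _
  unfold Spec_factorial_arr factorial_arr factorial_arr_alt
  by_cases h : data.length ≤ 1
  · interval_cases data.length <;> simp [faLoop]
  · simp only [if_neg h]
    rw [faLoop_fact data.length (by omega), prodRange_fact data.length (by omega)]
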